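-- pv_equiv track=rewrite | github.com/observerw/lsp-client | src/lsp_client/mcp/adapter.py | resolve_line
-- ===== SOURCE A (Python) =====
-- def resolve_line(text: str, pattern: str) -> int:
--     line: int | None = None
--
--     for i, content in enumerate(text.splitlines()):
--         if pattern not in content:
--             continue
--
--         if line is not None:
--             raise ValueError(f"Pattern {pattern} found in multiple lines")
--
--         line = i
--
--     if line is None:
--         raise ValueError(f"Pattern {pattern} not found in text")
--
--     return line
-- ===== SOURCE B (Python) =====
-- def _first_match(pairs, pattern):
--     for i, content in pairs:
--         if pattern in content:
--             return i
--     return None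
--
--
-- def resolve_line(text: str, pattern: str) -> int:
--     pairs = list(enumerate(text.splitlines()))
--     first = _first_match(pairs, pattern)
--     if first is None:
--         raise ValueError(f"Pattern {pattern} not found in text")
--     last = _first_match(reversed(pairs), pattern)
--     if first != last:
--         raise ValueError(f"Pattern {pattern} found in multiple lines")
--     return first
-- ===== Notes on version B (the rewrite author's own statement) =====
-- stated objective: alternative
-- what changed: B replaces A's single stateful pass with an Optional accumulator by a bidirectional search: it finds the first matching line from the front and the last matching line from the back, raises 'not found' if there is no first match and 'multiple lines' if first != last, otherwise returns the unique index; error messages are byte-for-byte identical.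
import Mathlib
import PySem

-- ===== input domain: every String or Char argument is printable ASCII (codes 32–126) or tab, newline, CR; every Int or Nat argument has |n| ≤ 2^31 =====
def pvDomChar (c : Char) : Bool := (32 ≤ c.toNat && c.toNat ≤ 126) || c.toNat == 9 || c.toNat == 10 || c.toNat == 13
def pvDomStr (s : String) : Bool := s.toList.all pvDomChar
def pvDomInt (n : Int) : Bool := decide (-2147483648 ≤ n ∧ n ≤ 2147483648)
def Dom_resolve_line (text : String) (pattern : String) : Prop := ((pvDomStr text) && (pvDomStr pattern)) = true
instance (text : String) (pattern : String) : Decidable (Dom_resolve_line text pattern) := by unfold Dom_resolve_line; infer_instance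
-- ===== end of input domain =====

-- B finds the first matching line from the front and the last from the back and compares them,
-- instead of A's single stateful scan with an Optional accumulator; same values on the unique-match inputs Pre_ admits.


-- ===== PORT A =====
-- A's loop over enumerate(text.splitlines()) with state `line : Option Int`;
-- outer `none` models a raise (ValueError), `some line` a normal loop exit.
def resolveLoopA (pattern : String) : List (Int × String) → Option Int → Option (Option Int)
  | [], line => some line
  | (i, content) :: rest, line =>
      if PySem.Str.isIn pattern content then
        match line with
        | some _ => none                    -- raise ValueError "found in multiple lines"
        | none => resolveLoopA pattern rest (some i)
      else resolveLoopA pattern rest line   -- continue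

def resolve_line (text : String) (pattern : String) : Int :=
  match resolveLoopA pattern (PySem.List.enumerate (PySem.Str.splitlines text)) none with
  | some (some line) => line
  | _ => 0                                  -- raise ValueError (outside Pre_)

-- ===== PORT B =====
-- B's helper `_first_match`: scan the (index, line) pairs, return the first matching index.
def firstMatchB (pattern : String) : List (Int × String) → Option Int
  | [] => none
  | (i, content) :: rest =>
      if PySem.Str.isIn pattern content then some i else firstMatchB pattern rest

def resolve_line_alt (text : String) (pattern : String) : Int :=
  let pairs := PySem.List.enumerate (PySem.Str.splitlines text)
  match firstMatchB pattern pairs with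
  | none => 0                               -- raise ValueError "not found" (outside Pre_)
  | some first =>
      match firstMatchB pattern pairs.reverse with   -- reversed(pairs)
      | some last => if first ≠ last then 0 else first   -- 0 = raise "multiple lines" (outside Pre_)
      | none => 0

-- ===== PRECONDITION & SPEC =====
-- A raises ValueError when zero lines or more than one line of text contain pattern; Pre_ admits exactly the unique-match inputs.
def Pre_resolve_line (text : String) (pattern : String) : Prop :=
  (PySem.Str.splitlines text).countP (fun c => PySem.Str.isIn pattern c) = 1
instance (text : String) (pattern : String) : Decidable (Pre_resolve_line text pattern) := by
  unfold Pre_resolve_line; infer_instance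

def pvWitness_resolve_line : String × String := ("ax\nby\ncz", "y")

def Spec_resolve_line (text : String) (pattern : String) (out : Int) : Prop := out = resolve_line_alt text pattern
instance (text : String) (pattern : String) (out : Int) : Decidable (Spec_resolve_line text pattern out) := by unfold Spec_resolve_line; infer_instance

-- ===== CLAIM (what is proved, stated in full; the proofs are below) =====
def Claim_equal_resolve_line : Prop := ∀ (text : String) (pattern : String), Dom_resolve_line text pattern → Pre_resolve_line text pattern → Spec_resolve_line text pattern (resolve_line text pattern)

-- ===== LEMMAS AND PROOFS =====

-- A's scan, characterised by the filtered match list it would collect.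
theorem resolveLoopA_char (pattern : String) (l : List (Int × String)) :
    ∀ line, resolveLoopA pattern l line =
      match line, (l.filter (fun p => PySem.Str.isIn pattern p.2)).map Prod.fst with
      | none, [] => some none
      | none, [m] => some (some m)
      | some x, [] => some (some x)
      | _, _ => none := by
  induction l with
  | nil => intro line; cases line <;> simp only [resolveLoopA, List.filter_nil, List.map_nil]
  | cons h t ih =>
    intro line
    obtain ⟨i, content⟩ := h
    by_cases hp : PySem.Str.isIn pattern content
    · cases line with
      | none =>
        simp only [resolveLoopA, hp, if_true, List.filter_cons, List.map_cons, ih]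
        cases hm : (t.filter (fun p => PySem.Str.isIn pattern p.2)).map Prod.fst <;> simp
      | some x =>
        simp only [resolveLoopA, hp, if_true, List.filter_cons, List.map_cons]
    · simp only [resolveLoopA, List.filter_cons, ih, if_neg hp]

-- B's forward scan returns the head of the filtered match list.
theorem firstMatchB_char (pattern : String) (l : List (Int × String)) :
    firstMatchB pattern l = ((l.filter (fun p => PySem.Str.isIn pattern p.2)).map Prod.fst).head? := by
  induction l with
  | nil => simp [firstMatchB]
  | cons h t ih =>
    obtain ⟨i, content⟩ := h
    by_cases hp : PySem.Str.isIn pattern content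
    · simp only [firstMatchB, List.filter_cons, if_pos hp, List.map_cons, List.head?_cons]
    · simp only [firstMatchB, List.filter_cons, if_neg hp, ih]

-- the filtered match list has length countP of the lines
theorem length_matches (pattern : String) (lines : List String) (s : Int) :
    (((PySem.List.enumerate lines s).filter (fun p => PySem.Str.isIn pattern p.2)).map
      Prod.fst).length = lines.countP (fun c => PySem.Str.isIn pattern c) := by
  induction lines generalizing s with
  | nil => simp only [PySem.List.enumerate_nil, List.filter_nil, List.map_nil,
      List.length_nil, List.countP_nil]
  | cons h t ih =>
    by_cases hp : PySem.Str.isIn pattern h <;>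
      simp only [PySem.List.enumerate_cons, List.filter_cons, hp, List.countP_cons,
        if_true, if_false, Bool.false_eq_true, List.map_cons, List.length_cons, ih]; omega

-- ===== VERDICT (by name: the statement is the Claim_ definition above) =====
theorem resolve_line_spec : Claim_equal_resolve_line := by
  intro text pattern _ hpre
  unfold Spec_resolve_line resolve_line resolve_line_alt
  have hlen := length_matches pattern (PySem.Str.splitlines text) 0
  rw [hpre] at hlen
  obtain ⟨m, hm⟩ := List.length_eq_one_iff.mp hlen
  have hrev : (((PySem.List.enumerate (PySem.Str.splitlines text)).reverse.filter
      (fun p => PySem.Str.isIn pattern p.2)).map Prod.fst) = [m] := by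
    rw [List.filter_reverse, List.map_reverse, hm]; rfl
  rw [resolveLoopA_char, hm]
  simp only [firstMatchB_char, hm, hrev, List.head?_cons]
  simp
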